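-- pv_equiv track=rewrite | github.com/minjungsung/Algorithm | 프로그래머스/0/181935. 홀짝에 따라 다른 값 반환하기/홀짝에 따라 다른 값 반환하기.py | solution
-- ===== SOURCE A (Python) =====
-- def solution(n):
--     answer = 0
--     if n % 2 == 0:
--         for i in range(n,0,-2):
--             answer += i * i
--     else:
--         for i in range(n,0,-2):
--             answer += i
--     return answer
-- ===== SOURCE B (Python) =====
-- def solution(n):
--     if n <= 0:
--         return 0
--     if n % 2 == 0:
--         m = n // 2
--         return 2 * m * (m + 1) * (2 * m + 1) // 3
--     k = (n + 1) // 2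
--     return k * k
-- ===== Notes on version B (the rewrite author's own statement) =====
-- stated objective: faster
-- what changed: Replaced the O(n) countdown loop by closed-form square-pyramidal and square-number formulas for the even and odd cases respectively.
import Mathlib
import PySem

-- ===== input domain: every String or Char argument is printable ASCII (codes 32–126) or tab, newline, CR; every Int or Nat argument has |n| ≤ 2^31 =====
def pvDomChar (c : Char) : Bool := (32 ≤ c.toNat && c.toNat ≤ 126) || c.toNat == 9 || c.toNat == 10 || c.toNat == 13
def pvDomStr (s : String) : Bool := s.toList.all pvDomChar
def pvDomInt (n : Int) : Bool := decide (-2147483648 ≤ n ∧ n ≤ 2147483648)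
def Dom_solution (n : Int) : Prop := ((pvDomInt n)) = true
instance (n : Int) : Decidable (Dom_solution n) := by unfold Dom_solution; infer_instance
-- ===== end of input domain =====

-- B replaces A's O(n) countdown loop by O(1) closed-form formulas (faster, asymptotic).

-- ===== PORT A =====
def solution (n : Int) : Int :=
  if PySem.Int.mod n 2 = 0 then
    (PySem.List.pyRange n 0 (-2)).foldl (fun acc i => acc + i * i) 0
  else
    (PySem.List.pyRange n 0 (-2)).foldl (fun acc i => acc + i) 0

-- ===== PORT B =====
def solution_alt (n : Int) : Int :=
  if n ≤ 0 then 0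
  else if PySem.Int.mod n 2 = 0 then
    let m := PySem.Int.floordiv n 2
    PySem.Int.floordiv (2 * m * (m + 1) * (2 * m + 1)) 3
  else
    let k := PySem.Int.floordiv (n + 1) 2
    k * k

-- ===== PRECONDITION & SPEC =====
def Spec_solution (n : Int) (out : Int) : Prop := out = solution_alt n
instance (n : Int) (out : Int) : Decidable (Spec_solution n out) := by unfold Spec_solution; infer_instance

-- ===== CLAIM (what is proved, stated in full; the proofs are below) =====
def Claim_equal_solution : Prop := ∀ (n : Int), Dom_solution n → Spec_solution n (solution n)

-- ===== LEMMAS AND PROOFS =====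

lemma pyRange_empty_of_nonpos (n : Int) (h : n ≤ 0) : PySem.List.pyRange n 0 (-2) = [] := by
  rw [PySem.List.pyRange_of_neg n 0 (by norm_num : (-2 : Int) < 0)]
  rw [if_neg (by omega : ¬ (0 : Int) < n)]
  simp

lemma pyRange_pos (n : Int) (h : 0 < n) :
    PySem.List.pyRange n 0 (-2) = (List.range ((n + 1) / 2).toNat).map (fun k : Nat => n + (-2) * (k : Int)) := by
  rw [PySem.List.pyRange_of_neg n 0 (by norm_num : (-2 : Int) < 0)]
  rw [if_pos (by omega : (0 : Int) < n)]
  have h1 : n - 0 + -(-2) - 1 = n + 1 := by ring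
  have h2 : -(-2 : Int) = 2 := by norm_num
  rw [h1, h2]

lemma sum_map_range (f : Nat → Int) (n : Nat) :
    ((List.range n).map f).sum = ∑ i ∈ Finset.range n, f i := by
  induction n with
  | zero => simp
  | succ n ih => simp [List.range_succ, Finset.sum_range_succ, ih]

lemma sq_sum_base (c : Nat) :
    (∑ j ∈ Finset.range c, ((2 * (j : Int) + 2) * (2 * (j : Int) + 2))) * 3
      = 2 * c * (c + 1) * (2 * c + 1) := by
  induction c with
  | zero => simp
  | succ c ih =>
    rw [Finset.sum_range_succ, add_mul, ih]
    push_cast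
    ring

lemma odd_sum_base (c : Nat) :
    (∑ j ∈ Finset.range c, (2 * (j : Int) + 1)) = c * c := by
  induction c with
  | zero => simp
  | succ c ih =>
    rw [Finset.sum_range_succ, ih]
    push_cast
    ring

lemma sq_sum_reflect (c : Nat) :
    (∑ k ∈ Finset.range c, ((2 * (c : Int) - 2 * k) * (2 * (c : Int) - 2 * k))) * 3
      = 2 * c * (c + 1) * (2 * c + 1) := by
  rw [← sq_sum_base c, ← Finset.sum_range_reflect (fun j => (2 * (j : Int) + 2) * (2 * (j : Int) + 2)) c]
  refine congrArg (· * 3) (Finset.sum_congr rfl ?_)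
  intro k hk
  rw [Finset.mem_range] at hk
  have : ((c - 1 - k : Nat) : Int) = (c : Int) - 1 - k := by omega
  rw [this]; ring

lemma odd_sum_reflect (c : Nat) :
    (∑ k ∈ Finset.range c, (2 * (c : Int) - 1 - 2 * k)) = c * c := by
  rw [← odd_sum_base c, ← Finset.sum_range_reflect (fun j => 2 * (j : Int) + 1) c]
  refine Finset.sum_congr rfl ?_
  intro k hk
  rw [Finset.mem_range] at hk
  have : ((c - 1 - k : Nat) : Int) = (c : Int) - 1 - k := by omega
  rw [this]; ring

theorem solution_spec : Claim_equal_solution := by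
  unfold Claim_equal_solution Spec_solution solution solution_alt
  intro n _
  by_cases hn : n ≤ 0
  · -- both loops run over the empty range; B returns 0
    rw [pyRange_empty_of_nonpos n hn, if_pos hn]
    split <;> simp
  · rw [if_neg hn]
    set c : Nat := ((n + 1) / 2).toNat with hc
    have hnpos : 0 < n := by omega
    have hmod : PySem.Int.mod n 2 = n % 2 := by
      unfold PySem.Int.mod
      rw [Int.fmod_eq_emod]
      simp
    by_cases he : PySem.Int.mod n 2 = 0
    · -- even: n = 2 * c
      have hn2 : n = 2 * (c : Int) := by
        rw [hmod] at he
        omega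
      rw [if_pos he, if_pos he, pyRange_pos n hnpos,
        PySem.List.foldl_add _ (fun i => i * i) 0, List.map_map, sum_map_range]
      have hfd : PySem.Int.floordiv n 2 = (c : Int) := by
        unfold PySem.Int.floordiv
        rw [Int.fdiv_eq_ediv]
        simp only [if_pos (Or.inl (by norm_num : (0:Int) ≤ 2))]
        omega
      rw [hfd]
      show 0 + (∑ i ∈ Finset.range c, ((fun i => i * i) ∘ fun k : Nat => n + (-2) * (k : Int)) i)
        = PySem.Int.floordiv (2 * (c : Int) * ((c : Int) + 1) * (2 * (c : Int) + 1)) 3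
      have hsum : (∑ i ∈ Finset.range c, ((fun i => i * i) ∘ fun k : Nat => n + (-2) * (k : Int)) i)
          = ∑ k ∈ Finset.range c, ((2 * (c : Int) - 2 * k) * (2 * (c : Int) - 2 * k)) := by
        refine Finset.sum_congr rfl ?_
        intro k _
        simp only [Function.comp]
        rw [hn2]; ring
      have h3 : 2 * (c : Int) * ((c : Int) + 1) * (2 * (c : Int) + 1)
          = 3 * ∑ k ∈ Finset.range c, ((2 * (c : Int) - 2 * k) * (2 * (c : Int) - 2 * k)) := by
        rw [mul_comm (3 : Int), sq_sum_reflect]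
      unfold PySem.Int.floordiv
      rw [hsum, h3, Int.mul_fdiv_cancel_left _ (by norm_num : (3:Int) ≠ 0), zero_add]
    · -- odd: n = 2 * c - 1
      have hn2 : n = 2 * (c : Int) - 1 := by
        rw [hmod] at he
        omega
      rw [if_neg he, if_neg he, pyRange_pos n hnpos,
        PySem.List.foldl_add _ (fun i => i) 0, List.map_map, sum_map_range]
      have hfd : PySem.Int.floordiv (n + 1) 2 = (c : Int) := by
        unfold PySem.Int.floordiv
        rw [Int.fdiv_eq_ediv]
        simp only [if_pos (Or.inl (by norm_num : (0:Int) ≤ 2))]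
        omega
      rw [hfd]
      show 0 + (∑ i ∈ Finset.range c, ((fun i => i) ∘ fun k : Nat => n + (-2) * (k : Int)) i)
        = (c : Int) * (c : Int)
      have hsum : (∑ i ∈ Finset.range c, ((fun i => i) ∘ fun k : Nat => n + (-2) * (k : Int)) i)
          = ∑ k ∈ Finset.range c, (2 * (c : Int) - 1 - 2 * k) := by
        refine Finset.sum_congr rfl ?_
        intro k _
        simp only [Function.comp]
        rw [hn2]; ring
      rw [hsum, odd_sum_reflect, zero_add]
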